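-- pv_equiv track=rewrite | github.com/Urhengulas/fall19-se_01-assessment | ex1/main.py | gen_win_board
-- ===== SOURCE A (Python) =====
-- def gen_win_board(dim: (int, int)) -> list:
--     nums = [i for i in range(dim[0]*dim[1])]
--     nums.append(0)
--     i = 1
--     ret = []
--     for _ in range(dim[0]):
--         tmp = []
--         for _ in range(dim[1]):
--             tmp.append(nums[i])
--             i += 1
--         ret.append(tmp)
--     return ret
-- ===== SOURCE B (Python) =====
-- def gen_win_board(dim: (int, int)) -> list:
--     rows, cols = dim
--     n = rows * cols
--     return [[(r * cols + c + 1) % n for c in range(cols)] for r in range(rows)]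
-- ===== Notes on version B (the rewrite author's own statement) =====
-- stated objective: simpler
-- what changed: B computes each cell directly from its (row, col) position by closed-form arithmetic ((r*cols+c+1) % n) in a nested comprehension, eliminating A's precomputed flat number list and its mutable running index.
import Mathlib
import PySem

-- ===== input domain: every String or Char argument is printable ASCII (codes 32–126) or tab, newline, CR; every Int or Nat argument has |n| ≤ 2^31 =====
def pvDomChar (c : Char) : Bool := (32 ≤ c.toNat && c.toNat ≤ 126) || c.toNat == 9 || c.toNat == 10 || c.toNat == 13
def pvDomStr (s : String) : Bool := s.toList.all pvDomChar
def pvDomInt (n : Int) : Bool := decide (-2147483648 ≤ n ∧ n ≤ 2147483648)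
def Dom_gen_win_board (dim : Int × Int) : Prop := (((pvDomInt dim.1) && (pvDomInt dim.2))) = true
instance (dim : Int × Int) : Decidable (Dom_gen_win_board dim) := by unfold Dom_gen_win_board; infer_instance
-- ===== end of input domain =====

-- B computes each cell by closed-form arithmetic ((r*cols+c+1) % n) in a nested comprehension,
-- removing A's flat number list and mutable running index; objective: simpler.


-- ===== PORT A =====
def gen_win_board (dim : Int × Int) : List (List Int) :=
  -- nums = [i for i in range(dim[0]*dim[1])]; nums.append(0)
  let nums : List Int := PySem.List.pyRange 0 (dim.1 * dim.2) 1 ++ [0]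
  -- i = 1; ret = []; nested for-loops appending nums[i] (then i += 1) row by row
  let st :=
    (PySem.List.pyRange 0 dim.1 1).foldl
      (fun (st : Int × List (List Int)) _ =>
        let inner :=
          (PySem.List.pyRange 0 dim.2 1).foldl
            (fun (st2 : Int × List Int) _ =>
              (st2.1 + 1, st2.2 ++ [PySem.List.pyGetD nums st2.1 0]))
            (st.1, [])
        (inner.1, st.2 ++ [inner.2]))
      (1, [])
  st.2

-- ===== PORT B =====
def gen_win_board_alt (dim : Int × Int) : List (List Int) :=
  let n := dim.1 * dim.2
  (PySem.List.pyRange 0 dim.1 1).map (fun r =>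
    (PySem.List.pyRange 0 dim.2 1).map (fun c =>
      PySem.Int.mod (r * dim.2 + c + 1) n))

-- ===== PRECONDITION & SPEC =====
def Spec_gen_win_board (dim : Int × Int) (out : List (List Int)) : Prop := out = gen_win_board_alt dim
instance (dim : Int × Int) (out : List (List Int)) : Decidable (Spec_gen_win_board dim out) := by unfold Spec_gen_win_board; infer_instance

-- ===== CLAIM (what is proved, stated in full; the proofs are below) =====
def Claim_equal_gen_win_board : Prop := ∀ (dim : Int × Int), Dom_gen_win_board dim → Spec_gen_win_board dim (gen_win_board dim)

-- ===== LEMMAS AND PROOFS =====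

-- A's inner loop: starting at index i, it appends g i, g (i+1), … and advances the index.
theorem pv_inner_fold (g : Int → Int) (l : List Int) (i : Int) (acc : List Int) :
    l.foldl (fun (st2 : Int × List Int) _ => (st2.1 + 1, st2.2 ++ [g st2.1])) (i, acc)
      = (i + l.length, acc ++ (List.range l.length).map (fun c : Nat => g (i + c))) := by
  induction l generalizing i acc with
  | nil => simp
  | cons x xs ih =>
      rw [List.foldl_cons, ih, List.length_cons, List.range_succ_eq_map]
      refine Prod.ext ?_ ?_
      · push_cast; ring
      · simp only [List.map_cons, List.map_map, List.append_assoc, List.singleton_append,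
          Nat.cast_zero, add_zero]
        congr 1
        congr 1
        apply List.map_congr_left
        intro a _
        simp only [Function.comp_apply]
        congr 1
        push_cast; ring

theorem pv_outer_fold (g : Int → Int) (cols : Int) (l : List Int) (i : Int)
    (ret : List (List Int)) :
    l.foldl
      (fun (st : Int × List (List Int)) _ =>
        let inner :=
          (PySem.List.pyRange 0 cols 1).foldl
            (fun (st2 : Int × List Int) _ => (st2.1 + 1, st2.2 ++ [g st2.1])) (st.1, [])
        (inner.1, st.2 ++ [inner.2]))
      (i, ret)
      = (i + l.length * (cols - 0).toNat,
         ret ++ (List.range l.length).map (fun r : Nat =>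
           (List.range (cols - 0).toNat).map (fun c : Nat => g (i + r * ((cols - 0).toNat : Int) + c)))) := by
  induction l generalizing i ret with
  | nil => simp
  | cons x xs ih =>
      rw [List.foldl_cons, ih, List.length_cons, List.range_succ_eq_map]
      simp only [pv_inner_fold, PySem.List.length_pyRange_one]
      refine Prod.ext ?_ ?_
      · push_cast; ring
      · simp only [List.map_cons, List.map_map, List.append_assoc, List.singleton_append,
          Nat.cast_zero, add_zero, zero_mul, List.nil_append]
        congr 1
        congr 1
        apply List.map_congr_left
        intro a _
        simp only [Function.comp_apply]
        apply List.map_congr_left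
        intro b _
        congr 1
        push_cast; ring

-- the value A reads at flat position 1 + r*cols + c of nums equals B's modulus expression
theorem pv_cell (rows cols : Int) (r c : Nat)
    (hr : r < (rows - 0).toNat) (hc : c < (cols - 0).toNat) :
    PySem.List.pyGetD (PySem.List.pyRange 0 (rows * cols) 1 ++ [0])
        (1 + (r : Int) * ((cols - 0).toNat : Int) + (c : Int)) 0
      = PySem.Int.mod ((0 + (r : Int)) * cols + (0 + (c : Int)) + 1) (rows * cols) := by
  have hrows : 0 < rows := by omega
  have hcols : 0 < cols := by omega
  have hn : 0 < rows * cols := by positivity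
  have hcolsN : ((cols - 0).toNat : Int) = cols := by omega
  rw [hcolsN]
  have hk : (1 : Int) + r * cols + c ≤ rows * cols := by
    have h1 : (r : Int) + 1 ≤ rows := by omega
    have h2 : (c : Int) + 1 ≤ cols := by omega
    nlinarith
  have hk0 : (0 : Int) ≤ 1 + r * cols + c := by positivity
  rw [PySem.Int.mod_eq_emod_of_pos hn]
  simp only [zero_add]
  rcases lt_or_eq_of_le hk with hlt | heq
  · -- strictly inside the range part: nums[k] = k, and k % n = k
    rw [PySem.List.pyGetD_eq_getElem _ _ hk0 (by
          simp [PySem.List.length_pyRange_one]; omega)]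
    rw [List.getElem_append_left (by simp [PySem.List.length_pyRange_one]; omega)]
    rw [PySem.List.getElem_pyRange_one]
    rw [Int.emod_eq_of_lt (by positivity) (by omega)]
    omega
  · -- the last cell: nums[n] = 0, and n % n = 0
    rw [PySem.List.pyGetD_eq_getElem _ _ hk0 (by
          simp [PySem.List.length_pyRange_one]; omega)]
    have hidx : ((1 : Int) + r * cols + c).toNat = (PySem.List.pyRange 0 (rows * cols) 1).length := by
      simp [PySem.List.length_pyRange_one]; omega
    simp only [hidx, List.getElem_append_right (le_refl _), Nat.sub_self, List.getElem_singleton]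
    have : ((r : Int)) * cols + c + 1 = rows * cols := by omega
    rw [this, Int.emod_self]

-- ===== VERDICT (by name: the statement is the Claim_ definition above) =====
theorem gen_win_board_spec : Claim_equal_gen_win_board := by
  intro dim _
  unfold Spec_gen_win_board gen_win_board gen_win_board_alt
  obtain ⟨rows, cols⟩ := dim
  simp only []
  rw [pv_outer_fold (fun j => PySem.List.pyGetD (PySem.List.pyRange 0 (rows * cols) 1 ++ [0]) j 0) cols]
  simp only [PySem.List.pyRange_one, List.map_map, List.nil_append, List.length_map,
    List.length_range]
  apply List.map_congr_left
  intro r hr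
  simp only [Function.comp_apply]
  apply List.map_congr_left
  intro c hc
  simp only [List.mem_range] at hr hc
  have := pv_cell rows cols r c hr hc
  simpa [PySem.List.pyRange_one] using this
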